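-- pv_equiv track=rewrite | github.com/JamesZXie/m2m-processing | main.py | tada_eval
-- ===== SOURCE A (Python) =====
-- def tada_eval(tf0, tf1, tf3, tf5):
--     # 12k for y accel, 32k for x rotation
--     condition1 = False
--     condition2 = False
--     condition3 = 0
--     condition4 = False
--
--     for val0, val1, val3, val5 in zip(tf0, tf1, tf3, tf5):
--         if val1 > 12000:
--             condition1 = True
--         if val3 > 30000:
--             condition2 = True
--         if val0 < -14000:
--             condition3 += 1
--         if val5 < -25000:
--             condition4 = True
--         if condition1 and condition2 and condition4 and condition3 > 5:
--             return True
--     return False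
-- ===== SOURCE B (Python) =====
-- def tada_eval(tf0, tf1, tf3, tf5):
--     rows = list(zip(tf0, tf1, tf3, tf5))
--     return (any(r[1] > 12000 for r in rows)
--             and any(r[2] > 30000 for r in rows)
--             and any(r[3] < -25000 for r in rows)
--             and sum(1 for r in rows if r[0] < -14000) > 5)
-- ===== Notes on version B (the rewrite author's own statement) =====
-- stated objective: simpler
-- what changed: Replaces the stateful accumulate-and-check loop (four flags and a counter updated together, early return mid-loop) by independent per-condition scans over the zipped rows (three any's and a count), exploiting that all conditions are monotone so 'jointly met at some iteration' equals 'each met somewhere'.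
import Mathlib
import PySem

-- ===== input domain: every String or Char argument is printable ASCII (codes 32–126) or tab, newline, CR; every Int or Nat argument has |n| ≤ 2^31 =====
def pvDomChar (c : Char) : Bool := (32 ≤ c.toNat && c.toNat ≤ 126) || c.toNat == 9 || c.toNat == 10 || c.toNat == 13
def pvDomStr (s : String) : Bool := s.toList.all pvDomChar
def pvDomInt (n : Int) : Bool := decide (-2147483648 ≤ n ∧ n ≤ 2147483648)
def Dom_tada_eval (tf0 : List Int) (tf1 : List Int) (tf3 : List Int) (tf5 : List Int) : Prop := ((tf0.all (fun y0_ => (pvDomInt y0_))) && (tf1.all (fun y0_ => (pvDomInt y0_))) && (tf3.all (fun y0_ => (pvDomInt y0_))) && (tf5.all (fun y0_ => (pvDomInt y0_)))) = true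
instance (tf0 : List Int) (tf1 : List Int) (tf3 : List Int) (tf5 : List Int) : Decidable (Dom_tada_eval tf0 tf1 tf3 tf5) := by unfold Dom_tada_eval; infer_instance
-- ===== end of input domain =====

-- B replaces A's stateful accumulate-and-check loop (four flags, a counter, early return) by
-- independent per-condition scans over the zipped rows; same O(n) cost, simpler decomposition.


-- ===== PORT A =====
-- loop of A: state (condition1, condition2, condition3, condition4), early return inside the loop
def tadaLoop : List (Int × Int × Int × Int) → Bool → Bool → Int → Bool → Bool
  | [], _, _, _, _ => false
  | (v0, v1, v3, v5) :: rest, c1, c2, c3, c4 =>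
    let c1 := if v1 > 12000 then true else c1
    let c2 := if v3 > 30000 then true else c2
    let c3 := if v0 < -14000 then c3 + 1 else c3
    let c4 := if v5 < -25000 then true else c4
    if c1 && c2 && c4 && decide (c3 > 5) then true
    else tadaLoop rest c1 c2 c3 c4

def tada_eval (tf0 : List Int) (tf1 : List Int) (tf3 : List Int) (tf5 : List Int) : Bool :=
  tadaLoop (tf0.zip (tf1.zip (tf3.zip tf5))) false false 0 false

-- ===== PORT B =====
def tada_eval_alt (tf0 : List Int) (tf1 : List Int) (tf3 : List Int) (tf5 : List Int) : Bool :=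
  let rows := tf0.zip (tf1.zip (tf3.zip tf5))
  rows.any (fun r => r.2.1 > 12000)
    && rows.any (fun r => r.2.2.1 > 30000)
    && rows.any (fun r => r.2.2.2 < -25000)
    && decide (5 < rows.countP (fun r => r.1 < -14000))

-- ===== PRECONDITION & SPEC =====
def Spec_tada_eval (tf0 : List Int) (tf1 : List Int) (tf3 : List Int) (tf5 : List Int) (out : Bool) : Prop := out = tada_eval_alt tf0 tf1 tf3 tf5
instance (tf0 : List Int) (tf1 : List Int) (tf3 : List Int) (tf5 : List Int) (out : Bool) : Decidable (Spec_tada_eval tf0 tf1 tf3 tf5 out) := by unfold Spec_tada_eval; infer_instance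

-- ===== CLAIM (what is proved, stated in full; the proofs are below) =====
def Claim_equal_tada_eval : Prop := ∀ (tf0 : List Int) (tf1 : List Int) (tf3 : List Int) (tf5 : List Int), Dom_tada_eval tf0 tf1 tf3 tf5 → Spec_tada_eval tf0 tf1 tf3 tf5 (tada_eval tf0 tf1 tf3 tf5)

-- ===== LEMMAS AND PROOFS =====

-- ===== VERDICT (by name: the statement is the Claim_ definition above) =====
-- Invariant: provided the guard is not already satisfied by the incoming state, the
-- stateful loop decides exactly "each flag eventually set and counter exceeds 5".
theorem if_true_or (P : Prop) [Decidable P] (c x : Bool) :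
    ((if P then true else c) || x) = (c || (decide P || x)) := by
  split_ifs with hP <;> simp [hP]

theorem if_true_elim (P : Prop) [Decidable P] (c : Bool)
    (h : (if P then true else c) = true) : c = true ∨ P := by
  split_ifs at h with hP
  · exact Or.inr hP
  · exact Or.inl h

theorem tadaLoop_eq (rows : List (Int × Int × Int × Int)) :
    ∀ (c1 c2 : Bool) (c3 : Int) (c4 : Bool),
      (c1 && c2 && c4 && decide (c3 > 5)) = false →
      tadaLoop rows c1 c2 c3 c4 =
        ((c1 || rows.any (fun r => r.2.1 > 12000))
          && (c2 || rows.any (fun r => r.2.2.1 > 30000))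
          && (c4 || rows.any (fun r => r.2.2.2 < -25000))
          && decide (c3 + (rows.countP (fun r => r.1 < -14000) : Int) > 5)) := by
  induction rows with
  | nil =>
    intro c1 c2 c3 c4 h
    simpa [tadaLoop] using h.symm
  | cons hd tl ih =>
    intro c1 c2 c3 c4 h
    obtain ⟨v0, v1, v3, v5⟩ := hd
    simp only [tadaLoop]
    by_cases hg :
        ((if v1 > 12000 then true else c1) && (if v3 > 30000 then true else c2)
          && (if v5 < -25000 then true else c4)
          && decide ((if v0 < -14000 then c3 + 1 else c3) > 5)) = true
    · rw [if_pos hg]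
      simp only [Bool.and_eq_true, decide_eq_true_eq] at hg
      obtain ⟨⟨⟨h1, h2⟩, h4⟩, h3⟩ := hg
      symm
      simp only [List.any_cons, List.countP_cons, Bool.and_eq_true, Bool.or_eq_true,
        decide_eq_true_eq]
      refine ⟨⟨⟨?_, ?_⟩, ?_⟩, ?_⟩
      · exact (if_true_elim _ _ h1).imp id Or.inl
      · exact (if_true_elim _ _ h2).imp id Or.inl
      · exact (if_true_elim _ _ h4).imp id Or.inl
      · split_ifs at h3 ⊢ <;> push_cast <;> omega
    · rw [if_neg hg]
      rw [ih _ _ _ _ (by simpa using hg)]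
      clear h hg ih
      simp only [List.any_cons, List.countP_cons]
      rw [if_true_or, if_true_or, if_true_or]
      congr 1
      rw [decide_eq_decide]
      simp only [decide_eq_true_eq]
      split_ifs <;> push_cast <;> omega

theorem tada_eval_spec : Claim_equal_tada_eval := by
  intro tf0 tf1 tf3 tf5 _
  unfold Spec_tada_eval tada_eval tada_eval_alt
  rw [tadaLoop_eq _ false false 0 false (by decide)]
  simp only [Bool.false_or]
  congr 1
  rw [decide_eq_decide]
  omega
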